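-- pv_equiv track=rewrite | github.com/E-Kozyreva/codewars | python/7 kyu/Likes Vs Dislikes.py | like_or_dislike
-- ===== SOURCE A (Python) =====
-- def like_or_dislike(lst):
--     if len(lst) == 0:
--         return "Nothing"
--     elif (len) == 1:
--         return lst[0]
--     else:
--         reaction = lst[0]
--         for i in range(1, len(lst)):
--             if reaction == lst[i]:
--                 reaction = "Nothing"
--             else:
--                 reaction = lst[i]
--         return reaction
-- ===== SOURCE B (Python) =====
-- def like_or_dislike(lst):
--     # Closed form: only the trailing run of equal elements matters; within a run
--     # the state alternates value/"Nothing", and every run starts in a non-cancelled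
--     # state, so the answer is the last element iff the trailing run length is odd.
--     if not lst:
--         return "Nothing"
--     last = lst[-1]
--     run = 1
--     for x in lst[-2::-1]:
--         if x != last:
--             break
--         run += 1
--     return last if run % 2 == 1 else "Nothing"
-- ===== Notes on version B (the rewrite author's own statement) =====
-- stated objective: alternative
-- what changed: Replaced A's full left-to-right state-machine scan with a closed form: B scans only the trailing run of equal elements backwards and returns the last element iff that run's length is odd (every run restarts the state machine, so earlier elements cannot affect the result).
import Mathlib
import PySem

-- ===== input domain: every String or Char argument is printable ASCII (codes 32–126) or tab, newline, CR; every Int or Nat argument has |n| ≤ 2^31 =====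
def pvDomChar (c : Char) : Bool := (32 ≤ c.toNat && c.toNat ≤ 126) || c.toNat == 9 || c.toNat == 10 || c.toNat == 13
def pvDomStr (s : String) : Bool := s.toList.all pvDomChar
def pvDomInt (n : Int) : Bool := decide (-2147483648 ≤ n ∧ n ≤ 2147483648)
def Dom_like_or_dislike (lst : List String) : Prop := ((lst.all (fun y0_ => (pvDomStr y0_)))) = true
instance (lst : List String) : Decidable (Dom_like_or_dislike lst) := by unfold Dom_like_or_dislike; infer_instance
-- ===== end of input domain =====

-- B replaces A's full left-to-right state-machine scan with a closed form over the trailing run of equal elements (alternative algorithm; returns the last element iff that run's length is odd).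


-- ===== PORT A =====
-- the Python's `elif (len) == 1` compares the builtin function `len` to 1: always False, dead branch
def like_or_dislike (lst : List String) : String :=
  if (lst.length : Int) = 0 then "Nothing"
  else
    (PySem.List.pyRange 1 (lst.length : Int) 1).foldl
      (fun reaction i =>
        if reaction = PySem.List.pyGetD lst i "" then "Nothing"
        else PySem.List.pyGetD lst i "")
      (PySem.List.pyGetD lst 0 "")

-- ===== PORT B =====
-- the `for x in lst[-2::-1]: if x != last: break; run += 1` loop of Source B: count of
-- leading elements equal to `last`
def countRun (last : String) : List String → Nat
  | [] => 0
  | x :: xs => if x = last then countRun last xs + 1 else 0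

def like_or_dislike_alt (lst : List String) : String :=
  match lst.reverse with
  | [] => "Nothing"
  | last :: rest =>
      if (1 + countRun last rest) % 2 = 1 then last else "Nothing"

-- ===== PRECONDITION & SPEC =====
def Spec_like_or_dislike (lst : List String) (out : String) : Prop := out = like_or_dislike_alt lst
instance (lst : List String) (out : String) : Decidable (Spec_like_or_dislike lst out) := by unfold Spec_like_or_dislike; infer_instance

-- ===== CLAIM (what is proved, stated in full; the proofs are below) =====
def Claim_equal_like_or_dislike : Prop := ∀ (lst : List String), Dom_like_or_dislike lst → Spec_like_or_dislike lst (like_or_dislike lst)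

-- ===== LEMMAS AND PROOFS =====

-- B's result read off a reversed nonempty list
def gRev : List String → String
  | [] => "Nothing"
  | last :: rest => if (1 + countRun last rest) % 2 = 1 then last else "Nothing"

-- A's per-element step
def stepA (r y : String) : String := if r = y then "Nothing" else y

lemma gRev_cons (a b : String) (rest : List String) :
    gRev (a :: b :: rest) = stepA (gRev (b :: rest)) a := by
  simp only [gRev, countRun, stepA]
  split_ifs <;> simp_all <;> omega

lemma foldl_eq_gRev (xs : List String) : ∀ (x : String),
    xs.foldl stepA x = gRev ((x :: xs).reverse) := by
  induction xs using List.reverseRecOn with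
  | nil => intro x; simp [gRev, countRun]
  | append_singleton ys a ih =>
    intro x
    have hrev : ((x :: (ys ++ [a])).reverse) = a :: (x :: ys).reverse := by
      simp
    rw [hrev, List.foldl_append, ih x]
    rcases h : (x :: ys).reverse with _ | ⟨b, rest⟩
    · exact absurd h (by simp)
    · simp only [List.foldl_cons, List.foldl_nil]
      exact (gRev_cons a b rest).symm

-- ===== VERDICT (by name: the statement is the Claim_ definition above) =====
theorem like_or_dislike_spec : Claim_equal_like_or_dislike := by
  intro lst _
  unfold Spec_like_or_dislike like_or_dislike like_or_dislike_alt
  cases lst with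
  | nil => simp
  | cons x xs =>
    simp only [List.length_cons]
    rw [if_neg (by push_cast; omega)]
    rw [show ((xs.length + 1 : Nat) : Int) = ((x :: xs).length : Int) by simp]
    rw [PySem.List.foldl_pyRange_pyGetD' (x :: xs) ""
      (fun r y => if r = y then "Nothing" else y) _ (by omega : (0:Int) ≤ 1)]
    simp only [PySem.List.pyGetD_zero_cons]
    rw [show List.drop (Int.toNat 1) (x :: xs) = xs by simp]
    rw [show (fun r y : String => if r = y then "Nothing" else y) = stepA from rfl,
       foldl_eq_gRev]
    rcases h : (x :: xs).reverse with _ | ⟨last, rest⟩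
    · simp at h
    · simp [gRev]
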